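-- pv_equiv track=rewrite | github.com/anhpdv/text_summarizer | summary_book.py | is_table_of_contents
-- ===== SOURCE A (Python) =====
-- def is_table_of_contents(text, chapter_lv1):
--     # Chuyển đổi văn bản thành chữ thường
--     text = text.lower()
--     number_markers = ['1.', '2.', '3.', '4.',
--                       '5.', '6.', '7.', '8.', '9.', '10.']
--
--     # Tách các dòng văn bản thành từng dòng riêng biệt
--     lines = text.split('\n')
--
--     # Kiểm tra xem có ít nhất một dòng bắt đầu bằng số hoặc từ khóa
--     for line in lines:
--         if line.strip().startswith(chapter_lv1):
--             return True
--
--     # Kiểm tra xem có ít nhất một dòng chứa các tiêu đề có độ sâu lồng nhau không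
--     for i in range(len(lines)):
--         if lines[i].strip().startswith(tuple(number_markers)):
--             for j in range(i+1, min(i+4, len(lines))):
--                 if lines[j].strip().startswith(tuple(number_markers)):
--                     return True
--     return False
-- ===== SOURCE B (Python) =====
-- def is_table_of_contents(text, chapter_lv1):
--     # Single pass: a sliding "window" counter replaces A's two separate loops.
--     markers = ('1.', '2.', '3.', '4.', '5.', '6.', '7.', '8.', '9.', '10.')
--     window = 0  # lines remaining in which a marker pairs with the last marker seen
--     for line in text.lower().split('\n'):
--         s = line.strip()
--         if s.startswith(chapter_lv1):
--             return True
--         if s.startswith(markers):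
--             if window > 0:
--                 return True
--             window = 3
--         elif window > 0:
--             window -= 1
--     return False
-- ===== Notes on version B (the rewrite author's own statement) =====
-- stated objective: simpler
-- what changed: A's two loops (a full chapter-keyword scan, then a nested index loop rescanning a 3-line forward window after each marker) are merged into one linear pass that keeps a countdown window since the last marker.
import Mathlib
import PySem

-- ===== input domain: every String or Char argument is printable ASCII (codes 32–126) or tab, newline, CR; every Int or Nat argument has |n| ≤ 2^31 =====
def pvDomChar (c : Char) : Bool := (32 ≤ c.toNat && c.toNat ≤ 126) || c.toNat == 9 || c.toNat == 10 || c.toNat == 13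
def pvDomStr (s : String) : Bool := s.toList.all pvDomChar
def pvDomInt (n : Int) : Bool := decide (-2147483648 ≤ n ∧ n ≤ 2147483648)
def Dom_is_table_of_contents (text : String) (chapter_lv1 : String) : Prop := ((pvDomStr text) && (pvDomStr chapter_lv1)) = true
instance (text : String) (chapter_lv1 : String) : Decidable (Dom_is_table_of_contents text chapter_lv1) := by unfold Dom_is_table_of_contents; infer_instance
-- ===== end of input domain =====

-- B merges A's two loops into one linear pass with a countdown window since the last marker (objective: simpler).


-- ===== PORT A =====
-- number_markers; line.strip().startswith(tuple(number_markers)) is an 'any' over the tuple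
def pvMarkers : List (List Char) :=
  [['1','.'], ['2','.'], ['3','.'], ['4','.'], ['5','.'], ['6','.'], ['7','.'], ['8','.'], ['9','.'], ['1','0','.']]

def pvIsMarker (s : List Char) : Bool := pvMarkers.any (fun m => PySem.Chars.startswith s m)

-- A's second phase: the outer 'for i in range(len(lines))' is recursion over the suffixes of
-- lines; the inner 'for j in range(i+1, min(i+4, len(lines)))' scans the next up-to-3 lines.
def pvAScan : List (List Char) → Bool
  | [] => false
  | l :: rest =>
    (if pvIsMarker (PySem.Chars.strip l) then
        (rest.take 3).any (fun j => pvIsMarker (PySem.Chars.strip j))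
      else false)
    || pvAScan rest

def is_table_of_contents (text : String) (chapter_lv1 : String) : Bool :=
  let t := PySem.Chars.lower text.toList
  let lines := PySem.Chars.splitOn t ['\n']
  if lines.any (fun l => PySem.Chars.startswith (PySem.Chars.strip l) chapter_lv1.toList) then
    true
  else
    pvAScan lines

-- ===== PORT B =====
-- single pass; w = number of upcoming lines in which a marker would pair with the last marker seen
def pvBScan (chap : List Char) : List (List Char) → Nat → Bool
  | [], _ => false
  | l :: rest, w =>
    let s := PySem.Chars.strip l
    if PySem.Chars.startswith s chap then true
    else if pvIsMarker s then
      (if 0 < w then true else pvBScan chap rest 3)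
    else pvBScan chap rest (w - 1)

def is_table_of_contents_alt (text : String) (chapter_lv1 : String) : Bool :=
  pvBScan chapter_lv1.toList (PySem.Chars.splitOn (PySem.Chars.lower text.toList) ['\n']) 0

-- ===== PRECONDITION & SPEC =====
def Spec_is_table_of_contents (text : String) (chapter_lv1 : String) (out : Bool) : Prop := out = is_table_of_contents_alt text chapter_lv1
instance (text : String) (chapter_lv1 : String) (out : Bool) : Decidable (Spec_is_table_of_contents text chapter_lv1 out) := by unfold Spec_is_table_of_contents; infer_instance

-- ===== CLAIM (what is proved, stated in full; the proofs are below) =====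
def Claim_equal_is_table_of_contents : Prop := ∀ (text : String) (chapter_lv1 : String), Dom_is_table_of_contents text chapter_lv1 → Spec_is_table_of_contents text chapter_lv1 (is_table_of_contents text chapter_lv1)

-- ===== LEMMAS AND PROOFS =====

-- B's one pass equals: a chapter line exists, OR a marker in the first w lines, OR A's pair scan.
theorem pvBScan_eq (chap : List Char) (lines : List (List Char)) (w : Nat) :
    pvBScan chap lines w =
      (lines.any (fun l => PySem.Chars.startswith (PySem.Chars.strip l) chap)
        || (lines.take w).any (fun l => pvIsMarker (PySem.Chars.strip l))
        || pvAScan lines) := by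
  induction lines generalizing w with
  | nil => simp [pvBScan, pvAScan]
  | cons l rest ih =>
    by_cases hp : PySem.Chars.startswith (PySem.Chars.strip l) chap
    · cases w <;> simp [pvBScan, hp]
    · by_cases hm : pvIsMarker (PySem.Chars.strip l)
      · cases w with
        | zero => simp [pvBScan, pvAScan, hp, hm, ih, Bool.or_assoc]
        | succ n =>
          simp [pvBScan, pvAScan, hp, hm]
      · cases w with
        | zero => simp [pvBScan, pvAScan, hp, hm, ih]
        | succ n => simp [pvBScan, pvAScan, hp, hm, ih]

-- ===== VERDICT (by name: the statement is the Claim_ definition above) =====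
theorem is_table_of_contents_spec : Claim_equal_is_table_of_contents := by
  intro text chapter_lv1 _
  unfold Spec_is_table_of_contents is_table_of_contents is_table_of_contents_alt
  rw [pvBScan_eq]
  simp only [List.take_zero, List.any_nil]
  by_cases h : (PySem.Chars.splitOn (PySem.Chars.lower text.toList) ['\n']).any
      (fun l => PySem.Chars.startswith (PySem.Chars.strip l) chapter_lv1.toList)
  · simp [h]
  · simp [h]
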